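-- pv_equiv track=rewrite | github.com/jconnors23/Python | top150/Maps/ContainsDuplicate/contains_duplicate.py | absolute_indices
-- ===== SOURCE A (Python) =====
-- def absolute_indices(map, target):
--     for key in map:
--         for i in range(len(map[key])):
--             for j in range(len(map[key])):
--                 if map[key][i] == map[key][j]:
--                     continue
--                 if abs(map[key][i] - map[key][j]) <= target:
--                     return True
--     return False
-- ===== SOURCE B (Python) =====
-- def absolute_indices(map, target):
--     for key in map:
--         s = sorted(map[key])
--         for a, b in zip(s, s[1:]):
--             if a != b and b - a <= target:
--                 return True
--     return False
-- ===== Notes on version B (the rewrite author's own statement) =====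
-- stated objective: faster
-- what changed: Instead of comparing every pair of values per key (quadratic), B sorts each key's list once and checks only adjacent distinct sorted values, since the minimum distance between two distinct values is realised by some adjacent distinct pair in sorted order.
import Mathlib
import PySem

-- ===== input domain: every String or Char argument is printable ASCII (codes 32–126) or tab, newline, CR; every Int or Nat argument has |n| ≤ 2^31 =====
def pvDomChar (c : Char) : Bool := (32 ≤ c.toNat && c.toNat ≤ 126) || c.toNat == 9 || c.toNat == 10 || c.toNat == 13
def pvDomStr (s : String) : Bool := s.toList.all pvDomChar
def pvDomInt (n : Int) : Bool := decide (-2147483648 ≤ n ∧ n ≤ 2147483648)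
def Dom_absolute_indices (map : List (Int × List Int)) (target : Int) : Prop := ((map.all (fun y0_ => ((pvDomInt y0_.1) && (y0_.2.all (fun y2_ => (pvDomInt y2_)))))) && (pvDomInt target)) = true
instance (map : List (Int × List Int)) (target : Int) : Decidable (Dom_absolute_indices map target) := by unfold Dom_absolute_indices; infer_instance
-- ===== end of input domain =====

-- B sorts each key's values once and checks only adjacent distinct sorted values instead of
-- comparing every pair of values (objective: asymptotically faster per key).

-- ===== PORT A =====
def absolute_indices (map : List (Int × List Int)) (target : Int) : Bool :=
  -- for key in map: …  (dict iteration = each stored key; map[key] = first-match lookup)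
  (map.map Prod.fst).any (fun key =>
    let xs := (PySem.Dict.mk map).getD key []
    (PySem.List.pyRange 0 (xs.length : Int) 1).any (fun i =>
      (PySem.List.pyRange 0 (xs.length : Int) 1).any (fun j =>
        let xi := PySem.List.pyGetD xs i 0
        let xj := PySem.List.pyGetD xs j 0
        decide (xi ≠ xj) && decide (|xi - xj| ≤ target))))

-- ===== PORT B =====
def absolute_indices_alt (map : List (Int × List Int)) (target : Int) : Bool :=
  (map.map Prod.fst).any (fun key =>
    let s := PySem.List.sorted ((PySem.Dict.mk map).getD key []) (fun x => x) false
    (s.zip (PySem.List.slice s (some 1) none)).any (fun p =>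
      decide (p.1 ≠ p.2) && decide (p.2 - p.1 ≤ target)))

-- ===== PRECONDITION & SPEC =====
def Spec_absolute_indices (map : List (Int × List Int)) (target : Int) (out : Bool) : Prop := out = absolute_indices_alt map target
instance (map : List (Int × List Int)) (target : Int) (out : Bool) : Decidable (Spec_absolute_indices map target out) := by unfold Spec_absolute_indices; infer_instance

-- ===== CLAIM (what is proved, stated in full; the proofs are below) =====
def Claim_equal_absolute_indices : Prop := ∀ (map : List (Int × List Int)) (target : Int), Dom_absolute_indices map target → Spec_absolute_indices map target (absolute_indices map target)

-- ===== LEMMAS AND PROOFS =====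

-- adjacent-equality chain: if every adjacent pair in [p,q] is equal, the ends are equal
lemma pv_chain_eq (s : List Int) (p : Nat) :
    ∀ q, p ≤ q → (∀ k, p ≤ k → k + 1 ≤ q → s.getD k 0 = s.getD (k+1) 0) →
      s.getD p 0 = s.getD q 0 := by
  intro q
  induction q with
  | zero => intro h _; have : p = 0 := by omega
            simp [this]
  | succ n ih =>
    intro hpq h
    rcases Nat.lt_or_ge p (n+1) with hlt | hge
    · have := ih (by omega) (fun k hk hk' => h k hk (by omega))
      rw [this, h n (by omega) (by omega)]
    · have : p = n + 1 := by omega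
      simp [this]

-- monotone access on a (≤)-pairwise list
lemma pv_mono (s : List Int) (hp : s.Pairwise (· ≤ ·)) :
    ∀ i j, i ≤ j → j < s.length → s.getD i 0 ≤ s.getD j 0 := by
  intro i j hij hj
  rcases Nat.eq_or_lt_of_le hij with rfl | hlt
  · exact le_refl _
  · rw [List.getD_eq_getElem s 0 (by omega), List.getD_eq_getElem s 0 hj]
    exact (List.pairwise_iff_getElem.mp hp) i j (by omega) hj hlt

-- from two distinct indexed values, an adjacent distinct close pair exists
lemma pv_adj_of_indices (s : List Int) (hp : s.Pairwise (· ≤ ·)) (t : Int) (p q : Nat)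
    (hq : q < s.length) (hpq : p < q) (hne : s.getD p 0 ≠ s.getD q 0)
    (hle : s.getD q 0 - s.getD p 0 ≤ t) :
    ∃ k, k + 1 < s.length ∧ s.getD k 0 ≠ s.getD (k+1) 0 ∧ s.getD (k+1) 0 - s.getD k 0 ≤ t := by
  by_contra hcon
  push Not at hcon
  apply hne
  apply pv_chain_eq s p q (by omega)
  intro k hk hk1
  by_contra hne'
  have h1 : s.getD p 0 ≤ s.getD k 0 := pv_mono s hp p k hk (by omega)
  have h2 : s.getD (k+1) 0 ≤ s.getD q 0 := pv_mono s hp (k+1) q hk1 hq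
  have := hcon k (by omega) hne'
  omega

-- A's nested loops as an existential over values
lemma pv_A_iff (xs : List Int) (t : Int) :
    ((PySem.List.pyRange 0 (xs.length : Int) 1).any (fun i =>
      (PySem.List.pyRange 0 (xs.length : Int) 1).any (fun j =>
        decide (PySem.List.pyGetD xs i 0 ≠ PySem.List.pyGetD xs j 0) &&
        decide (|PySem.List.pyGetD xs i 0 - PySem.List.pyGetD xs j 0| ≤ t))) = true)
    ↔ ∃ x ∈ xs, ∃ y ∈ xs, x ≠ y ∧ |x - y| ≤ t := by
  simp only [List.any_eq_true, PySem.List.mem_pyRange_one, Bool.and_eq_true, decide_eq_true_eq]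
  constructor
  · rintro ⟨i, ⟨hi0, hil⟩, j, ⟨hj0, hjl⟩, hne, habs⟩
    exact ⟨_, PySem.List.pyGetD_mem xs 0 ⟨by omega, hil⟩, _,
           PySem.List.pyGetD_mem xs 0 ⟨by omega, hjl⟩, hne, habs⟩
  · rintro ⟨x, hx, y, hy, hne, habs⟩
    obtain ⟨n, hn, hxn⟩ := List.mem_iff_getElem.mp hx
    obtain ⟨m, hm, hym⟩ := List.mem_iff_getElem.mp hy
    refine ⟨(n : Int), ⟨by omega, by exact_mod_cast hn⟩, (m : Int), ⟨by omega, by exact_mod_cast hm⟩, ?_, ?_⟩ <;>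
      simp only [PySem.List.pyGetD_natCast, List.getD_eq_getElem xs 0 hn, List.getD_eq_getElem xs 0 hm, hxn, hym]
    · exact hne
    · exact habs

-- B's adjacent scan as an existential over adjacent indices
lemma pv_B_iff (s : List Int) (t : Int) :
    ((s.zip (PySem.List.slice s (some 1) none)).any (fun p =>
      decide (p.1 ≠ p.2) && decide (p.2 - p.1 ≤ t)) = true)
    ↔ ∃ k, k + 1 < s.length ∧ s.getD k 0 ≠ s.getD (k+1) 0 ∧ s.getD (k+1) 0 - s.getD k 0 ≤ t := by
  rw [PySem.List.slice_from_one]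
  simp only [List.any_eq_true, Bool.and_eq_true, decide_eq_true_eq]
  constructor
  · rintro ⟨⟨a, b⟩, hmem, hne, hle⟩
    obtain ⟨k, hk, hget⟩ := List.mem_iff_getElem.mp hmem
    have hkl : k < s.length := lt_of_lt_of_le hk (by simp [List.length_zip])
    have hkt : k < s.tail.length := lt_of_lt_of_le hk (by simp [List.length_zip])
    have hk1 : k + 1 < s.length := by simp [List.length_tail] at hkt; omega
    rw [List.getElem_zip] at hget
    have ha : s[k] = a := congrArg Prod.fst hget
    have hb : s[k+1] = b := by rw [← List.getElem_tail hkt]; exact congrArg Prod.snd hget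
    refine ⟨k, hk1, ?_, ?_⟩ <;>
      rw [List.getD_eq_getElem s 0 hkl, List.getD_eq_getElem s 0 hk1, ha, hb]
    · exact hne
    · exact hle
  · rintro ⟨k, hk1, hne, hle⟩
    have hkl : k < s.length := by omega
    have hkt : k < s.tail.length := by simp [List.length_tail]; omega
    refine ⟨(s[k], s.tail[k]), ?_, ?_, ?_⟩
    · exact List.mem_iff_getElem.mpr ⟨k, by simp [List.length_zip]; omega, by rw [List.getElem_zip]⟩
    · rw [List.getD_eq_getElem s 0 hkl, List.getD_eq_getElem s 0 hk1] at hne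
      simpa [List.getElem_tail] using hne
    · rw [List.getD_eq_getElem s 0 hkl, List.getD_eq_getElem s 0 hk1] at hle
      simpa [List.getElem_tail] using hle

-- the bridge: distinct close pair in xs ↔ adjacent distinct close pair in sorted xs
lemma pv_bridge (xs : List Int) (t : Int) :
    (∃ x ∈ xs, ∃ y ∈ xs, x ≠ y ∧ |x - y| ≤ t)
    ↔ (∃ k, k + 1 < (PySem.List.sorted xs (fun x => x) false).length ∧
        (PySem.List.sorted xs (fun x => x) false).getD k 0 ≠ (PySem.List.sorted xs (fun x => x) false).getD (k+1) 0 ∧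
        (PySem.List.sorted xs (fun x => x) false).getD (k+1) 0 - (PySem.List.sorted xs (fun x => x) false).getD k 0 ≤ t) := by
  set s := PySem.List.sorted xs (fun x => x) false with hs
  have hperm : s.Perm xs := PySem.List.sorted_perm ..
  have hpair : s.Pairwise (· ≤ ·) := PySem.List.sorted_pairwise xs (fun x => x)
  constructor
  · rintro ⟨x, hx, y, hy, hne, habs⟩
    obtain ⟨p, hpl, hxp⟩ := List.mem_iff_getElem.mp (hperm.mem_iff.mpr hx)
    obtain ⟨q, hql, hyq⟩ := List.mem_iff_getElem.mp (hperm.mem_iff.mpr hy)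
    have hgp : s.getD p 0 = x := by rw [List.getD_eq_getElem s 0 hpl, hxp]
    have hgq : s.getD q 0 = y := by rw [List.getD_eq_getElem s 0 hql, hyq]
    rcases Nat.lt_trichotomy p q with hlt | heq | hgt
    · have hxy : x ≤ y := by rw [← hgp, ← hgq]; exact pv_mono s hpair p q (le_of_lt hlt) hql
      exact pv_adj_of_indices s hpair t p q hql hlt (by rw [hgp, hgq]; exact hne)
        (by rw [hgp, hgq]; rw [abs_sub_comm] at habs; calc y - x = |y - x| := (abs_of_nonneg (by omega)).symm
              _ ≤ t := habs)
    · exact absurd (hxp.symm.trans (heq ▸ hyq)) hne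
    · have hyx : y ≤ x := by rw [← hgp, ← hgq]; exact pv_mono s hpair q p (le_of_lt hgt) hpl
      exact pv_adj_of_indices s hpair t q p hpl hgt (by rw [hgp, hgq]; exact fun h => hne h.symm)
        (by rw [hgp, hgq]; calc x - y = |x - y| := (abs_of_nonneg (by omega)).symm
              _ ≤ t := habs)
  · rintro ⟨k, hk1, hne, hle⟩
    have hkl : k < s.length := by omega
    have ha : s.getD k 0 ∈ s := by rw [List.getD_eq_getElem s 0 hkl]; exact List.getElem_mem _
    have hb : s.getD (k+1) 0 ∈ s := by rw [List.getD_eq_getElem s 0 hk1]; exact List.getElem_mem _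
    have hab : s.getD k 0 ≤ s.getD (k+1) 0 := pv_mono s hpair k (k+1) (by omega) hk1
    exact ⟨s.getD k 0, hperm.mem_iff.mp ha, s.getD (k+1) 0, hperm.mem_iff.mp hb, hne,
      by rw [abs_sub_comm]; rw [abs_of_nonneg (by omega)]; exact hle⟩

-- per-key equality of the two loop bodies
lemma pv_perKey (xs : List Int) (t : Int) :
    ((PySem.List.pyRange 0 (xs.length : Int) 1).any (fun i =>
      (PySem.List.pyRange 0 (xs.length : Int) 1).any (fun j =>
        decide (PySem.List.pyGetD xs i 0 ≠ PySem.List.pyGetD xs j 0) &&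
        decide (|PySem.List.pyGetD xs i 0 - PySem.List.pyGetD xs j 0| ≤ t))))
    = ((PySem.List.sorted xs (fun x => x) false).zip
        (PySem.List.slice (PySem.List.sorted xs (fun x => x) false) (some 1) none)).any (fun p =>
        decide (p.1 ≠ p.2) && decide (p.2 - p.1 ≤ t)) := by
  rw [Bool.eq_iff_iff, pv_A_iff, pv_B_iff, pv_bridge]

-- ===== VERDICT (by name: the statement is the Claim_ definition above) =====
theorem absolute_indices_spec : Claim_equal_absolute_indices := by
  intro map target _
  unfold Spec_absolute_indices absolute_indices absolute_indices_alt
  exact List.any_congr rfl (fun key => pv_perKey _ _)
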